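-- pv_equiv track=rewrite | github.com/XingBin111/LeetCode | Greedy/python/intervalSchedule.py | interval_schedule_while
-- ===== SOURCE A (Python) =====
-- def interval_schedule_while(intvs):
--     intvs = sorted(intvs, key=lambda e: e[1])
--     start = 0
--     n = len(intvs)
--     valid_interval_num = 0
--     while start < n:
--         jump = 0
--         for i in range(start, n):
--             if intvs[i][0] < intvs[start][1]:
--                 jump += 1
--         start += jump
--         valid_interval_num += 1
--     return valid_interval_num
-- ===== SOURCE B (Python) =====
-- def _insert_sorted(l, x):
--     # return a new sorted list = l with x inserted (l nondecreasing)
--     out = []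
--     i = 0
--     while i < len(l) and l[i] < x:
--         out.append(l[i])
--         i += 1
--     out.append(x)
--     out.extend(l[i:])
--     return out
--
--
-- def _count_less(l, x):
--     # l nondecreasing: number of elements < x, stopping at the first >= x
--     c = 0
--     for v in l:
--         if v < x:
--             c += 1
--         else:
--             break
--     return c
--
--
-- def interval_schedule_while(intvs):
--     xs = sorted(intvs, key=lambda e: e[1])
--     n = len(xs)
--     # one backward pass: cnt[j] = #(i >= j with xs[i][0] < xs[j][1]),
--     # maintained via an ordered index of suffix starts
--     cnt = [0] * n
--     suffix = []
--     for j in range(n - 1, -1, -1):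
--         suffix = _insert_sorted(suffix, xs[j][0])
--         cnt[j] = _count_less(suffix, xs[j][1])
--     res = 0
--     start = 0
--     while start < n:
--         start += cnt[start]
--         res += 1
--     return res
-- ===== Notes on version B (the rewrite author's own statement) =====
-- stated objective: alternative
-- what changed: Instead of rescanning the whole tail of the end-sorted list at every iteration of the while loop, B makes one backward pass that maintains an ordered index of suffix starts and precomputes every jump count (via ordered insertion and an early-exit count), then walks the jump chain through the precomputed table.
import Mathlib
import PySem

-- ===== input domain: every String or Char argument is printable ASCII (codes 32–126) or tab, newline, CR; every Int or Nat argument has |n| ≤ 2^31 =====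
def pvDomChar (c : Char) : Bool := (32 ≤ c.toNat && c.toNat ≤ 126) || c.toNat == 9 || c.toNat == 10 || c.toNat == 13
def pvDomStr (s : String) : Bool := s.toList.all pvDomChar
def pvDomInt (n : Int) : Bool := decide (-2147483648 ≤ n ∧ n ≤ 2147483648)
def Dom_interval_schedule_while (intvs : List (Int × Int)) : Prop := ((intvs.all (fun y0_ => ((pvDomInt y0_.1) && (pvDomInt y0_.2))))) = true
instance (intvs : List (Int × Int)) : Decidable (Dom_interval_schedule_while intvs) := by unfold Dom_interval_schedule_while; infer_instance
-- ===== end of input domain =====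

-- B replaces A's repeated forward scans by one backward pass that keeps an ordered index of
-- suffix starts, precomputing every jump count before walking the chain (objective: alternative).

-- ===== PORT A =====
-- inner 'for i in range(start, n)' of A; xs subscripts are always in range when 0 ≤ start < n,
-- so pyGetD with a dummy default is exact there
def aInner (xs : List (Int × Int)) (start n : Int) : Int :=
  (PySem.List.pyRange start n 1).foldl
    (fun jump i =>
      if (PySem.List.pyGetD xs i (0, 0)).1 < (PySem.List.pyGetD xs start (0, 0)).2 then
        jump + 1
      else jump) 0

-- A's 'while start < n' loop; the fuel only makes the recursion total: whenever the Python
-- loop terminates it does so within n iterations (start grows by ≥ 1 each iteration)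
def aLoop (xs : List (Int × Int)) (n : Int) : Nat → Int → Int → Int
  | 0, _, acc => acc
  | fuel + 1, start, acc =>
    if start < n then
      aLoop xs n fuel (start + aInner xs start n) (acc + 1)
    else acc

def interval_schedule_while (intvs : List (Int × Int)) : Int :=
  let xs := PySem.List.sorted intvs (fun e => e.2)
  aLoop xs (xs.length : Int) (xs.length + 1) 0 0

-- ===== PORT B =====
-- Source B's _insert_sorted: insert x before the first element not < x
def bInsert : List Int → Int → List Int
  | [], x => [x]
  | v :: vs, x => if v < x then v :: bInsert vs x else x :: v :: vs

-- Source B's _count_less: count a sorted list's elements < x, stopping at the first ≥ x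
def bCountLess : List Int → Int → Int
  | [], _ => 0
  | v :: vs, x => if v < x then 1 + bCountLess vs x else 0

-- Source B's backward 'for j in range(n-1, -1, -1)' pass: returns (cnt, ordered suffix starts)
def bBuild : List (Int × Int) → List Int × List Int
  | [] => ([], [])
  | (a, b) :: rest =>
    let p := bBuild rest
    let suf' := bInsert p.2 a
    (bCountLess suf' b :: p.1, suf')

-- Source B's 'while start < n' chain walk over the precomputed cnt table (fuel as in aLoop)
def bLoop (cnt : List Int) (n : Int) : Nat → Int → Int → Int
  | 0, _, acc => acc
  | fuel + 1, start, acc =>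
    if start < n then
      bLoop cnt n fuel (start + PySem.List.pyGetD cnt start 0) (acc + 1)
    else acc

def interval_schedule_while_alt (intvs : List (Int × Int)) : Int :=
  let xs := PySem.List.sorted intvs (fun e => e.2)
  bLoop (bBuild xs).1 (xs.length : Int) (xs.length + 1) 0 0

-- ===== PRECONDITION & SPEC =====
def Spec_interval_schedule_while (intvs : List (Int × Int)) (out : Int) : Prop := out = interval_schedule_while_alt intvs
instance (intvs : List (Int × Int)) (out : Int) : Decidable (Spec_interval_schedule_while intvs out) := by unfold Spec_interval_schedule_while; infer_instance

-- ===== CLAIM (what is proved, stated in full; the proofs are below) =====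
def Claim_equal_interval_schedule_while : Prop := ∀ (intvs : List (Int × Int)), Dom_interval_schedule_while intvs → Spec_interval_schedule_while intvs (interval_schedule_while intvs)

-- ===== LEMMAS AND PROOFS =====

-- the count both sides compute at position j of the sorted list
def cntSpec (xs : List (Int × Int)) (j : Nat) : Int :=
  ((xs.drop j).countP (fun p => decide (p.1 < (xs.getD j (0, 0)).2)) : Int)

theorem bInsert_perm (l : List Int) (x : Int) : (bInsert l x).Perm (x :: l) := by
  induction l with
  | nil => simp [bInsert]
  | cons v vs ih =>
    simp only [bInsert]
    split
    · exact ((ih.cons v).trans (List.Perm.swap x v vs)).symm.symm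
    · exact List.Perm.refl _

theorem bInsert_sorted (l : List Int) (x : Int) (h : l.Pairwise (· ≤ ·)) :
    (bInsert l x).Pairwise (· ≤ ·) := by
  induction l with
  | nil => simp [bInsert]
  | cons v vs ih =>
    rcases List.pairwise_cons.mp h with ⟨hv, hvs⟩
    simp only [bInsert]
    split
    · rename_i hlt
      refine List.pairwise_cons.mpr ⟨?_, ih hvs⟩
      intro w hw
      rcases List.mem_cons.mp ((bInsert_perm vs x).mem_iff.mp hw) with rfl | hw
      · omega
      · exact hv w hw
    · rename_i hge
      refine List.pairwise_cons.mpr ⟨?_, h⟩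
      intro w hw
      rcases List.mem_cons.mp hw with hw | hw
      · subst hw; omega
      · exact le_trans (by omega) (hv w hw)

theorem bCountLess_eq (l : List Int) (x : Int) (h : l.Pairwise (· ≤ ·)) :
    bCountLess l x = (l.countP (fun v => decide (v < x)) : Int) := by
  induction l with
  | nil => simp [bCountLess]
  | cons v vs ih =>
    rcases List.pairwise_cons.mp h with ⟨hv, hvs⟩
    simp only [bCountLess, List.countP_cons]
    by_cases hlt : v < x
    · simp [hlt, ih hvs]; omega
    · have : vs.countP (fun v => decide (v < x)) = 0 := by
        apply List.countP_eq_zero.mpr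
        intro w hw
        have := hv w hw
        simp; omega
      simp [hlt, this]

theorem bBuild_snd_perm (xs : List (Int × Int)) :
    ((bBuild xs).2).Perm (xs.map Prod.fst) := by
  induction xs with
  | nil => simp [bBuild]
  | cons hd rest ih =>
    obtain ⟨a, b⟩ := hd
    simp only [bBuild, List.map_cons]
    exact (bInsert_perm (bBuild rest).2 a).trans (ih.cons a)

theorem bBuild_snd_sorted (xs : List (Int × Int)) :
    ((bBuild xs).2).Pairwise (· ≤ ·) := by
  induction xs with
  | nil => simp [bBuild]
  | cons hd rest ih =>
    obtain ⟨a, b⟩ := hd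
    exact bInsert_sorted _ a ih

theorem bBuild_fst_getD (xs : List (Int × Int)) (j : Nat) (hj : j < xs.length) :
    (bBuild xs).1.getD j 0 = cntSpec xs j := by
  induction xs generalizing j with
  | nil => simp at hj
  | cons hd rest ih =>
    obtain ⟨a, b⟩ := hd
    cases j with
    | zero =>
      have hsort : (bInsert (bBuild rest).2 a).Pairwise (· ≤ ·) :=
        bInsert_sorted _ a (bBuild_snd_sorted rest)
      have hperm : (bInsert (bBuild rest).2 a).Perm (a :: rest.map Prod.fst) :=
        (bInsert_perm (bBuild rest).2 a).trans ((bBuild_snd_perm rest).cons a)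
      simp only [bBuild, List.getD_cons_zero, cntSpec, List.drop_zero, List.getD_cons_zero]
      rw [bCountLess_eq _ b hsort, hperm.countP_eq]
      have : (a :: rest.map Prod.fst).countP (fun v => decide (v < b))
          = ((a, b) :: rest).countP (fun p => decide (p.1 < b)) := by
        have : ((a, b) :: rest).map Prod.fst = a :: rest.map Prod.fst := by simp
        rw [← this, List.countP_map]
        rfl
      rw [this]
    | succ j =>
      have hj' : j < rest.length := by simpa using hj
      simp only [bBuild, List.getD_cons_succ, cntSpec, List.drop_succ_cons, List.getD_cons_succ]
      exact ih j hj'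

theorem aInner_eq_cntSpec (xs : List (Int × Int)) (start : Int)
    (h0 : 0 ≤ start) :
    aInner xs start (xs.length : Int) = cntSpec xs start.toNat := by
  unfold aInner
  rw [PySem.List.foldl_pyRange_pyGetD' xs (0, 0)
      (fun jump p => if p.1 < (PySem.List.pyGetD xs start (0, 0)).2 then jump + 1 else jump) 0 h0]
  rw [PySem.List.foldl_ite_add_one]
  have htn : ((start.toNat : Nat) : Int) = start := Int.toNat_of_nonneg h0
  rw [← htn, PySem.List.pyGetD_natCast]
  simp only [cntSpec, Int.toNat_natCast, zero_add]
  rfl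

theorem loops_eq (xs : List (Int × Int)) (fuel : Nat) :
    ∀ start acc : Int, 0 ≤ start →
      aLoop xs (xs.length : Int) fuel start acc
        = bLoop (bBuild xs).1 (xs.length : Int) fuel start acc := by
  induction fuel with
  | zero => intro start acc _; rfl
  | succ fuel ih =>
    intro start acc h0
    simp only [aLoop, bLoop]
    split
    · rename_i hlt
      have hj : aInner xs start (xs.length : Int) = PySem.List.pyGetD (bBuild xs).1 start 0 := by
        have htn : ((start.toNat : Nat) : Int) = start := Int.toNat_of_nonneg h0
        have hlen : start.toNat < xs.length := by omega
        rw [aInner_eq_cntSpec xs start h0]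
        rw [← htn, PySem.List.pyGetD_natCast]
        rw [bBuild_fst_getD xs start.toNat hlen]
        rw [Int.toNat_natCast]
      rw [hj]
      apply ih
      have : 0 ≤ PySem.List.pyGetD (bBuild xs).1 start 0 := by
        rw [← hj, aInner_eq_cntSpec xs start h0]
        simp [cntSpec]
      omega
    · rfl

-- ===== VERDICT (by name: the statement is the Claim_ definition above) =====
theorem interval_schedule_while_spec : Claim_equal_interval_schedule_while := by
  intro intvs _
  unfold Spec_interval_schedule_while interval_schedule_while interval_schedule_while_alt
  exact loops_eq (PySem.List.sorted intvs (fun e => e.2)) _ 0 0 le_rfl
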